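-- pv_equiv track=rewrite | github.com/pypi-data/pypi-mirror-354 | packages/filedata/filedata-0.3.tar.gz/filedata-0.3/filedata/image.py | rotate_region_box
-- ===== SOURCE A (Python) =====
-- from typing import Optional, List, Tuple, Union
--
-- RegionBox = Tuple[Tuple[int, int], Tuple[int, int], Tuple[int, int], Tuple[int, int]]
--
-- def rotate_region_box(angle: int, box: RegionBox, width: int, height: int) -> RegionBox:
--     """
--     逆时针旋转
--     """
--     if angle not in (0, 90, 180, 270):
--         raise ValueError('angle must be one of 0, 90, 180 and 270')
--     _times = angle // 90
--
--     for _ in range(_times):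
--         box = (
--             [box[1][1], width - box[1][0]],
--             [box[2][1], width - box[2][0]],
--             [box[3][1], width - box[3][0]],
--             [box[0][1], width - box[0][0]],
--         )
--         width, height = height, width
--     return box
-- ===== SOURCE B (Python) =====
-- def rotate_region_box(angle, box, width, height):
--     """Direct case analysis on angle with closed-form composed transforms."""
--     if angle == 0:
--         return box
--     (x0, y0), (x1, y1), (x2, y2), (x3, y3) = box
--     if angle == 90:
--         return ([y1, width - x1], [y2, width - x2], [y3, width - x3], [y0, width - x0])
--     if angle == 180:
--         return ([width - x2, height - y2], [width - x3, height - y3],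
--                 [width - x0, height - y0], [width - x1, height - y1])
--     if angle == 270:
--         return ([height - y3, x3], [height - y0, x0], [height - y1, x1], [height - y2, x2])
--     raise ValueError('angle must be one of 0, 90, 180 and 270')
-- ===== Notes on version B (the rewrite author's own statement) =====
-- stated objective: simpler
-- what changed: Replaces the repeated-rotation loop (applying the 90-degree transform angle//90 times while swapping width/height) with a direct case analysis on angle using precomposed closed-form formulas for 90/180/270.
import Mathlib
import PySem

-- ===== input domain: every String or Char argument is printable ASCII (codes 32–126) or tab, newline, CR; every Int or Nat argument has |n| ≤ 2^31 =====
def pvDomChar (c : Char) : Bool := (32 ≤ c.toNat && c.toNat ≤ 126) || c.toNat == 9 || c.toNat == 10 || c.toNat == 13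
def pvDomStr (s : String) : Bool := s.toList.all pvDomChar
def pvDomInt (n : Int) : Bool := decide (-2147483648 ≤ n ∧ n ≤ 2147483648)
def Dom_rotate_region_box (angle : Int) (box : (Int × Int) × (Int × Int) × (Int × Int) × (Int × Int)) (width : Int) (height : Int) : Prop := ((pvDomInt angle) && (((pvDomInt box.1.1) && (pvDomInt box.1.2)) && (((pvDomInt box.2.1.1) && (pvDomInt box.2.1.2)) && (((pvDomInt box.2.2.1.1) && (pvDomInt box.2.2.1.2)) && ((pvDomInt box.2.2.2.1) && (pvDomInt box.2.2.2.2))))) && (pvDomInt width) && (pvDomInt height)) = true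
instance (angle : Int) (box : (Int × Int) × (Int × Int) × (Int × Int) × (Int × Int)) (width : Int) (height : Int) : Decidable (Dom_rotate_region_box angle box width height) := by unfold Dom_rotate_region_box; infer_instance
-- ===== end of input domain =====

-- ===== PORT A =====
-- B replaces A's repeated-rotation loop with a direct case analysis on angle (objective: simpler).
-- Port of A: the for-loop over range(angle // 90) becomes a foldl over PySem.List.pyRange
-- with state (box, width, height); the box state stays a 4-tuple of pairs (as in Python) and is
-- rendered as a list of 2-element lists at the end (the Lean return type).
def rotate_region_box (angle : Int) (box : (Int × Int) × (Int × Int) × (Int × Int) × (Int × Int)) (width : Int) (height : Int) : List (List Int) :=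
  let times := PySem.Int.floordiv angle 90
  let st := (PySem.List.pyRange 0 times 1).foldl
    (fun (st : (((Int × Int) × (Int × Int) × (Int × Int) × (Int × Int)) × Int × Int)) _ =>
      let b := st.1
      let w := st.2.1
      let h := st.2.2
      (((b.2.1.2, w - b.2.1.1),
        (b.2.2.1.2, w - b.2.2.1.1),
        (b.2.2.2.2, w - b.2.2.2.1),
        (b.1.2, w - b.1.1)), h, w))
    (box, width, height)
  let b := st.1
  [[b.1.1, b.1.2], [b.2.1.1, b.2.1.2], [b.2.2.1.1, b.2.2.1.2], [b.2.2.2.1, b.2.2.2.2]]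

-- ===== PORT B =====
def rotate_region_box_alt (angle : Int) (box : (Int × Int) × (Int × Int) × (Int × Int) × (Int × Int)) (width : Int) (height : Int) : List (List Int) :=
  let (x0, y0) := box.1
  let (x1, y1) := box.2.1
  let (x2, y2) := box.2.2.1
  let (x3, y3) := box.2.2.2
  if angle = 0 then
    [[x0, y0], [x1, y1], [x2, y2], [x3, y3]]
  else if angle = 90 then
    [[y1, width - x1], [y2, width - x2], [y3, width - x3], [y0, width - x0]]
  else if angle = 180 then
    [[width - x2, height - y2], [width - x3, height - y3],
     [width - x0, height - y0], [width - x1, height - y1]]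
  else if angle = 270 then
    [[height - y3, x3], [height - y0, x0], [height - y1, x1], [height - y2, x2]]
  else []  -- unreachable under Pre_: Python B raises ValueError here, as A does

-- ===== PRECONDITION & SPEC =====
-- Pre_ excludes exactly the angles on which Python A raises ValueError (B raises there too).
def Pre_rotate_region_box (angle : Int) (_box : (Int × Int) × (Int × Int) × (Int × Int) × (Int × Int)) (_width : Int) (_height : Int) : Prop :=
  angle = 0 ∨ angle = 90 ∨ angle = 180 ∨ angle = 270
instance (angle : Int) (box : (Int × Int) × (Int × Int) × (Int × Int) × (Int × Int)) (width : Int) (height : Int) : Decidable (Pre_rotate_region_box angle box width height) := by unfold Pre_rotate_region_box; infer_instance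
def pvWitness_rotate_region_box : Int × ((Int × Int) × (Int × Int) × (Int × Int) × (Int × Int)) × Int × Int := (90, ((1, 2), (3, 4), (5, 6), (7, 8)), 10, 20)
def Spec_rotate_region_box (angle : Int) (box : (Int × Int) × (Int × Int) × (Int × Int) × (Int × Int)) (width : Int) (height : Int) (out : List (List Int)) : Prop := out = rotate_region_box_alt angle box width height
instance (angle : Int) (box : (Int × Int) × (Int × Int) × (Int × Int) × (Int × Int)) (width : Int) (height : Int) (out : List (List Int)) : Decidable (Spec_rotate_region_box angle box width height out) := by unfold Spec_rotate_region_box; infer_instance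

-- ===== CLAIM (what is proved, stated in full; the proofs are below) =====
def Claim_equal_rotate_region_box : Prop := ∀ (angle : Int) (box : (Int × Int) × (Int × Int) × (Int × Int) × (Int × Int)) (width : Int) (height : Int), Dom_rotate_region_box angle box width height → Pre_rotate_region_box angle box width height → Spec_rotate_region_box angle box width height (rotate_region_box angle box width height)

-- ===== LEMMAS AND PROOFS =====

-- ===== VERDICT (by name: the statement is the Claim_ definition above) =====
theorem rotate_region_box_spec : Claim_equal_rotate_region_box := by
  intro angle box width height _ hpre
  unfold Spec_rotate_region_box rotate_region_box rotate_region_box_alt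
  obtain ⟨⟨x0, y0⟩, ⟨x1, y1⟩, ⟨x2, y2⟩, ⟨x3, y3⟩⟩ := box
  rcases hpre with h | h | h | h <;> subst h <;>
    simp [PySem.Int.floordiv, PySem.List.pyRange, List.range_succ, List.foldl]
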